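-- pv_equiv track=rewrite | github.com/oryon-dominik/tailwind-class-prefixer | application/parser/tailwind.py | match_classes
-- ===== SOURCE A (Python) =====
-- def match_classes(classes: list, prefixes: list) -> list:
--     matches = []
--     for prefix in prefixes:
--         # normal classes
--         pure_classes = [c for c in classes if ':' not in c]
--         pure_classes = [c for c in pure_classes if c.startswith(prefix)]
--         matches.extend(pure_classes)
--         # media queries
--         media_query_classes = [c for c in classes if ':' in c]
--         media_query_classes = [c for c in media_query_classes if c.split(':')[1].startswith(prefix)]
--         matches.extend(media_query_classes)
--         # classbindings
--         classbinding_classes = [c for c in classes if '{' in c and '}' in c]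
--         classbinding_classes = [c.split(':')[0].removeprefix('{').strip() for c in classbinding_classes]
--         classbinding_classes = [c for c in classbinding_classes if c.startswith(prefix)]
--         matches.extend(classbinding_classes)
--     return list(set(matches))
-- ===== SOURCE B (Python) =====
-- # Faster re-implementation: key and categorize every class ONCE, drop duplicate values
-- # (a duplicate has the same key, so it matches the same prefixes and can never survive the
-- # final dedup), sort each category by key, and binary-search each prefix's contiguous key
-- # range instead of rescanning and re-splitting the whole class list for every prefix.
--
-- def _bisect_left(entries, p):
--     lo, hi = 0, len(entries)
--     while lo < hi:
--         mid = (lo + hi) // 2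
--         if entries[mid][0] < p:
--             lo = mid + 1
--         else:
--             hi = mid
--     return lo
--
--
-- def _collect(entries, p):
--     i = _bisect_left(entries, p)
--     hits = []
--     while i < len(entries) and entries[i][0].startswith(p):
--         hits.append(entries[i])
--         i += 1
--     hits.sort(key=lambda e: e[1])
--     return [e[2] for e in hits]
--
--
-- def _dedup_values(entries):
--     seen = set()
--     out = []
--     for e in entries:
--         if e[2] not in seen:
--             seen.add(e[2])
--             out.append(e)
--     return out
--
--
-- def _bkey(c):
--     return c.split(':')[0].removeprefix('{').strip()
--
--
-- def match_classes(classes: list, prefixes: list) -> list: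
--     pure = sorted(_dedup_values([(c, i, c) for i, c in enumerate(classes) if ':' not in c]),
--                   key=lambda e: e[0])
--     media = sorted(_dedup_values([(c.split(':')[1], i, c) for i, c in enumerate(classes) if ':' in c]),
--                    key=lambda e: e[0])
--     binds = sorted(_dedup_values([(_bkey(c), i, _bkey(c)) for i, c in enumerate(classes) if '{' in c and '}' in c]),
--                    key=lambda e: e[0])
--     matches = []
--     for p in prefixes:
--         matches.extend(_collect(pure, p))
--         matches.extend(_collect(media, p))
--         matches.extend(_collect(binds, p))
--     return list(dict.fromkeys(matches))
-- ===== Notes on version B (the rewrite author's own statement) =====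
-- stated objective: faster
-- what changed: Instead of re-filtering and re-splitting the whole class list three times for every prefix, B keys and categorizes each class once, drops duplicate-valued entries (equal values have equal keys, so later duplicates can never survive the final dedup), sorts each category by key, and binary-searches each prefix's contiguous key range; the output set is identical (A's list(set(...)) vs B's ordered dedup, compared as a set).
import Mathlib
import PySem

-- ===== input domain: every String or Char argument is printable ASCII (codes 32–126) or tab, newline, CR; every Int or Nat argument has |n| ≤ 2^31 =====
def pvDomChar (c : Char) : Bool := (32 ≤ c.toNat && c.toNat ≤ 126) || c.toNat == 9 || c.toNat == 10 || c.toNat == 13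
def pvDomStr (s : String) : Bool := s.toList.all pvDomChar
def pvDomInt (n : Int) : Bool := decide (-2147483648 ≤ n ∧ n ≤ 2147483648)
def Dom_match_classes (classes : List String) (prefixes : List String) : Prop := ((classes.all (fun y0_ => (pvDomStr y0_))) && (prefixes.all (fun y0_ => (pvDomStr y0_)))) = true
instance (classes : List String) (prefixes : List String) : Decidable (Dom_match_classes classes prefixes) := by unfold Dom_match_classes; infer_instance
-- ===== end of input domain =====

-- B replaces A's per-prefix triple rescan by keying each class once, dropping
-- duplicate-valued entries (equal values have equal keys, so a later duplicate can never
-- survive the final dedup), sorting each category, and binary-searching each prefix's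
-- contiguous key range; A's list(set(...)) iteration order is unspecified hash order, so
-- both ports emit the distinct matches in first-occurrence order (outputs are compared as sets).

-- shared Python-string helpers (both Pythons compute c.split(':') and .removeprefix('{'))
-- c.split(':') — the separator ':' is nonempty, so PySem.Str.split? always returns some
def pySplitColon (c : String) : List String := (PySem.Str.split? c ":").getD []
-- s.removeprefix('{'): drop the first char iff it is '{' (exact: the prefix has length 1)
def pyRemoveBrace (s : String) : String :=
  if PySem.Str.startswith s "{" then String.ofList (s.toList.drop 1) else s
-- c.split(':')[1] — safe in both programs: only evaluated when ':' in c, so there are ≥ 2 pieces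
def pyMediaKey (c : String) : String := PySem.List.pyGetD (pySplitColon c) 1 ""
-- c.split(':')[0].removeprefix('{').strip()  (helper _bkey in Source B; inlined in A)
def pyBindKey (c : String) : String :=
  PySem.Str.strip (pyRemoveBrace (PySem.List.pyGetD (pySplitColon c) 0 ""))

-- ===== PORT A =====
def match_classes (classes : List String) (prefixes : List String) : List String :=
  let matches_ := prefixes.foldl (fun matches_ pfx =>
    -- normal classes
    let pure_classes := classes.filter (fun c => !(PySem.Str.isIn ":" c))
    let pure_classes := pure_classes.filter (fun c => PySem.Str.startswith c pfx)
    let matches_ := matches_ ++ pure_classes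
    -- media queries
    let media_query_classes := classes.filter (fun c => PySem.Str.isIn ":" c)
    let media_query_classes := media_query_classes.filter
      (fun c => PySem.Str.startswith (pyMediaKey c) pfx)
    let matches_ := matches_ ++ media_query_classes
    -- classbindings
    let classbinding_classes := classes.filter (fun c => PySem.Str.isIn "{" c && PySem.Str.isIn "}" c)
    let classbinding_classes := classbinding_classes.map (fun c => pyBindKey c)
    let classbinding_classes := classbinding_classes.filter (fun c => PySem.Str.startswith c pfx)
    matches_ ++ classbinding_classes) []
  -- list(set(matches)): the distinct elements (set iteration order is hash order; compared as a set)
  PySem.Set.ofList matches_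

-- ===== PORT B =====
-- _bisect_left's while loop: hi - lo strictly decreases, so len(entries) iterations suffice (fuel)
def pvBisectLoop (entries : List (String × Nat × String)) (p : String) :
    Nat → Nat → Nat → Nat
  | 0, lo, _ => lo
  | fuel + 1, lo, hi =>
    if lo < hi then
      let mid := (lo + hi) / 2   -- (lo + hi) // 2 on nonnegative ints
      if (entries.getD mid ("", 0, "")).1 < p then pvBisectLoop entries p fuel (mid + 1) hi
      else pvBisectLoop entries p fuel lo mid
    else lo

def pvBisectLeft (entries : List (String × Nat × String)) (p : String) : Nat :=
  pvBisectLoop entries p entries.length 0 entries.length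

-- _dedup_values: 'if e[2] not in seen: seen.add(e[2]); out.append(e)' over a running set
def pvDedupValues (entries : List (String × Nat × String)) : List (String × Nat × String) :=
  (entries.foldl (fun acc e =>
      if PySem.Set.contains acc.1 e.2.2 then acc
      else (PySem.Set.add acc.1 e.2.2, acc.2 ++ [e])) (PySem.Set.empty, [])).2

-- _collect: the index walk 'while i < len(entries) and entries[i][0].startswith(p)' collects
-- exactly the startswith-run of entries beginning at i, i.e. takeWhile on drop i
def pvCollect (entries : List (String × Nat × String)) (p : String) : List String :=
  let i := pvBisectLeft entries p
  let hits := (entries.drop i).takeWhile (fun e => PySem.Str.startswith e.1 p)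
  let hits := PySem.List.sorted hits (fun e => e.2.1)
  hits.map (fun e => e.2.2)

def match_classes_alt (classes : List String) (prefixes : List String) : List String :=
  let pure_ := PySem.List.sorted (pvDedupValues
    ((classes.zipIdx.filter (fun ci => !(PySem.Str.isIn ":" ci.1))).map
      (fun ci => (ci.1, ci.2, ci.1)))) (fun e => e.1)
  let media := PySem.List.sorted (pvDedupValues
    ((classes.zipIdx.filter (fun ci => PySem.Str.isIn ":" ci.1)).map
      (fun ci => (pyMediaKey ci.1, ci.2, ci.1)))) (fun e => e.1)
  let binds := PySem.List.sorted (pvDedupValues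
    ((classes.zipIdx.filter (fun ci => PySem.Str.isIn "{" ci.1 && PySem.Str.isIn "}" ci.1)).map
      (fun ci => (pyBindKey ci.1, ci.2, pyBindKey ci.1)))) (fun e => e.1)
  let matches_ := prefixes.foldl (fun matches_ p =>
    matches_ ++ pvCollect pure_ p ++ pvCollect media p ++ pvCollect binds p) []
  -- list(dict.fromkeys(matches)): first-occurrence dedup
  PySem.List.dedup matches_

-- ===== PRECONDITION & SPEC =====
def Spec_match_classes (classes : List String) (prefixes : List String) (out : List String) : Prop := out = match_classes_alt classes prefixes
instance (classes : List String) (prefixes : List String) (out : List String) : Decidable (Spec_match_classes classes prefixes out) := by unfold Spec_match_classes; infer_instance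

-- ===== CLAIM (what is proved, stated in full; the proofs are below) =====
def Claim_equal_match_classes : Prop := ∀ (classes : List String) (prefixes : List String), Dom_match_classes classes prefixes → Spec_match_classes classes prefixes (match_classes classes prefixes)

-- ===== LEMMAS AND PROOFS =====

-- lexicographic facts about Python's (= Lean's) string order
lemma pvLex1 (p k : List Char) (h : p <+: k) : ¬ k < p := by
  obtain ⟨r, rfl⟩ := h
  induction p with
  | nil => exact List.not_lt_nil r
  | cons c t ih =>
    intro hlt
    rcases (List.cons_lt_cons_iff).1 hlt with h1 | ⟨_, h2⟩
    · exact lt_irrefl _ h1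
    · exact ih h2

lemma pvLex2 (p a b : List Char) (hpb : p <+: b) (h1 : ¬ a < p) (h2 : ¬ b < a) : p <+: a := by
  induction p generalizing a b with
  | nil => exact List.nil_prefix
  | cons c t ih =>
    obtain ⟨b', rfl, hb'⟩ := List.cons_prefix_iff.1 hpb
    match a with
    | [] => exact absurd (List.nil_lt_cons c t) h1
    | d :: a' =>
      have hdc : d = c := by
        rcases lt_trichotomy d c with h | h | h
        · exact absurd (List.cons_lt_cons_iff.2 (Or.inl h)) h1
        · exact h
        · exact absurd (List.cons_lt_cons_iff.2 (Or.inl h)) h2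
      subst hdc
      have h1' : ¬ a' < t := fun hx => h1 (List.cons_lt_cons_iff.2 (Or.inr ⟨rfl, hx⟩))
      have h2' : ¬ b' < a' := fun hx => h2 (List.cons_lt_cons_iff.2 (Or.inr ⟨rfl, hx⟩))
      exact List.cons_prefix_cons.2 ⟨rfl, ih a' b' hb' h1' h2'⟩

-- string versions: startswith k p means p is a prefix of k
lemma pvStartswith_not_lt {k p : String} (h : PySem.Str.startswith k p = true) : ¬ k < p := by
  rw [PySem.Str.startswith_eq, PySem.Chars.startswith_iff] at h
  intro hlt
  exact pvLex1 _ _ h (String.lt_iff_toList_lt.1 hlt)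

lemma pvStartswith_down {a b p : String} (hpb : PySem.Str.startswith b p = true)
    (h1 : ¬ a < p) (h2 : a ≤ b) : PySem.Str.startswith a p = true := by
  rw [PySem.Str.startswith_eq, PySem.Chars.startswith_iff] at hpb ⊢
  refine pvLex2 _ _ _ hpb (fun hx => h1 (String.lt_iff_toList_lt.2 hx))
    (fun hx => absurd (String.lt_iff_toList_lt.2 hx) (not_lt.2 h2))

-- once a Bool test fails it fails for all later elements ⇒ takeWhile = filter
lemma pvTakeWhileEqFilter {α : Type} (Q : α → Bool) :
    ∀ l : List α, l.Pairwise (fun a b => Q b = true → Q a = true) →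
      l.takeWhile Q = l.filter Q := by
  intro l hl
  induction l with
  | nil => rfl
  | cons x t ih =>
    rcases List.pairwise_cons.1 hl with ⟨hx, ht⟩
    by_cases hq : Q x = true
    · simp [hq, ih ht]
    · have : t.filter Q = [] := List.filter_eq_nil_iff.2 (fun a ha hqa => hq (hx a ha hqa))
      simp [hq, this]

-- the binary-search loop of B: on a key-sorted list it returns the left insertion point
lemma pvBisectLoop_spec (s : List (String × Nat × String)) (p : String)
    (hkey : s.Pairwise (fun a b => a.1 ≤ b.1)) :
    ∀ fuel lo hi, lo ≤ hi → hi ≤ s.length → hi - lo ≤ fuel →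
      (∀ j, (hj : j < s.length) → j < lo → s[j].1 < p) →
      (∀ j, (hj : j < s.length) → hi ≤ j → p ≤ s[j].1) →
      pvBisectLoop s p fuel lo hi ≤ s.length ∧
      (∀ j, (hj : j < s.length) → j < pvBisectLoop s p fuel lo hi → s[j].1 < p) ∧
      (∀ j, (hj : j < s.length) → pvBisectLoop s p fuel lo hi ≤ j → p ≤ s[j].1) := by
  have hmono := List.pairwise_iff_getElem.1 hkey
  intro fuel
  induction fuel with
  | zero =>
    intro lo hi hlohi hhile hfuel hbelow habove
    have : lo = hi := by omega
    subst this
    exact ⟨le_trans hlohi hhile, by simpa [pvBisectLoop] using hbelow,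
      by simpa [pvBisectLoop] using habove⟩
  | succ n ih =>
    intro lo hi hlohi hhile hfuel hbelow habove
    by_cases hlt : lo < hi
    · have hmid1 : lo ≤ (lo + hi) / 2 := by omega
      have hmid2 : (lo + hi) / 2 < hi := by omega
      have hmlen : (lo + hi) / 2 < s.length := lt_of_lt_of_le hmid2 hhile
      have hget : s.getD ((lo + hi) / 2) ("", 0, "") = s[(lo + hi) / 2] :=
        List.getD_eq_getElem s _ hmlen
      by_cases hc : (s.getD ((lo + hi) / 2) ("", 0, "")).1 < p
      · rw [hget] at hc
        have hstep : pvBisectLoop s p (n + 1) lo hi = pvBisectLoop s p n ((lo + hi) / 2 + 1) hi := by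
          simp only [pvBisectLoop, if_pos hlt, hget, if_pos hc]
        rw [hstep]
        refine ih ((lo + hi) / 2 + 1) hi (by omega) hhile (by omega) ?_ habove
        intro j hj hjlt
        rcases Nat.lt_or_ge j ((lo + hi) / 2) with h | h
        · exact lt_of_le_of_lt (hmono j ((lo + hi) / 2) hj hmlen h) hc
        · have : j = (lo + hi) / 2 := by omega
          simpa [this] using hc
      · rw [hget] at hc
        have hstep : pvBisectLoop s p (n + 1) lo hi = pvBisectLoop s p n lo ((lo + hi) / 2) := by
          simp only [pvBisectLoop, if_pos hlt, hget, if_neg hc]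
        rw [hstep]
        refine ih lo ((lo + hi) / 2) (by omega) (le_of_lt hmlen) (by omega) hbelow ?_
        intro j hj hjge
        rcases Nat.lt_or_ge j ((lo + hi) / 2 + 1) with h | h
        · have : j = (lo + hi) / 2 := by omega
          subst this
          exact le_of_not_gt hc
        · exact le_trans (le_of_not_gt hc) (hmono ((lo + hi) / 2) j hmlen hj (by omega))
    · have : pvBisectLoop s p (n + 1) lo hi = lo := by simp [pvBisectLoop, hlt]
      rw [this]
      have hle : hi = lo := by omega
      exact ⟨le_trans hlohi hhile, hbelow, fun j hj hgj => habove j hj (by omega)⟩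

lemma pvBisectLeft_spec (s : List (String × Nat × String)) (p : String)
    (hkey : s.Pairwise (fun a b => a.1 ≤ b.1)) :
    pvBisectLeft s p ≤ s.length ∧
    (∀ j, (hj : j < s.length) → j < pvBisectLeft s p → s[j].1 < p) ∧
    (∀ j, (hj : j < s.length) → pvBisectLeft s p ≤ j → p ≤ s[j].1) := by
  exact pvBisectLoop_spec s p hkey s.length 0 s.length (Nat.zero_le _) le_rfl (by omega)
    (by omega) (fun j hj h => absurd hj (by omega))

-- core: on a category list with strictly increasing sequence numbers, B's sorted
-- binary-search collection equals A's in-order filter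
lemma pvCollect_sorted_eq (ents : List (String × Nat × String)) (p : String)
    (hseq : ents.Pairwise (fun a b => a.2.1 < b.2.1)) :
    pvCollect (PySem.List.sorted ents (fun e => e.1)) p
      = (ents.filter (fun e => PySem.Str.startswith e.1 p)).map (fun e => e.2.2) := by
  set P : (String × Nat × String) → Bool := fun e => PySem.Str.startswith e.1 p with hP
  set s := PySem.List.sorted ents (fun e => e.1) with hs
  have hkey : s.Pairwise (fun a b => a.1 ≤ b.1) := PySem.List.sorted_pairwise ents _
  have hperm : s.Perm ents := PySem.List.sorted_perm ents _ false
  obtain ⟨hlole, hbelow, habove⟩ := pvBisectLeft_spec s p hkey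
  set lo := pvBisectLeft s p with hlo
  -- the filter of the part before lo is empty
  have htake : (s.take lo).filter P = [] := by
    refine List.filter_eq_nil_iff.2 ?_
    intro e he hPe
    obtain ⟨j, hj, hje⟩ := List.mem_take_iff_getElem.1 he
    have hjs : j < s.length := by omega
    have hlt : s[j].1 < p := hbelow j hjs (by omega)
    rw [hje] at hlt
    exact pvStartswith_not_lt hPe (by simpa using hlt)
  -- takeWhile on the rest is the filter of the rest
  have hdrop : (s.drop lo).takeWhile P = (s.drop lo).filter P := by
    refine pvTakeWhileEqFilter P _ ?_
    refine List.pairwise_iff_getElem.2 ?_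
    intro i j hi hj hij hPj
    have hilen : lo + i < s.length := by
      have := hi; simp [List.length_drop] at this; omega
    have hjlen : lo + j < s.length := by
      have := hj; simp [List.length_drop] at this; omega
    rw [List.getElem_drop] at hPj ⊢
    have hle : s[lo + i].1 ≤ s[lo + j].1 :=
      (List.pairwise_iff_getElem.1 hkey) _ _ hilen hjlen (by omega)
    have hge : p ≤ s[lo + i].1 := habove _ hilen (by omega)
    exact pvStartswith_down hPj (not_lt.2 hge) hle
  -- hence the hits are exactly the filter of s
  have hhits : (s.drop lo).takeWhile P = s.filter P := by
    rw [hdrop]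
    conv_rhs => rw [← List.take_append_drop lo s]
    rw [List.filter_append, htake, List.nil_append]
  -- re-sorting the hits by sequence number restores the original order
  have hfin : PySem.List.sorted ((s.drop lo).takeWhile P) (fun e => e.2.1)
      = ents.filter P := by
    refine PySem.List.sorted_eq_of_perm_of_pairwise_lt _ _ _ ?_ (hseq.filter P)
    rw [hhits]
    exact (hperm.filter P).symm
  simp only [pvCollect]
  rw [← hlo, hfin]

-- every projection of zipIdx: filtering on the string and mapping a function of it
lemma pvZipIdxProj (v : String → String) (q : String → Bool) :
    ∀ (classes : List String) (n : Nat),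
      ((classes.zipIdx n).filter (fun ci => q ci.1)).map (fun ci => v ci.1)
        = (classes.filter q).map v := by
  intro classes
  induction classes with
  | nil => intro n; rfl
  | cons c t ih =>
    intro n
    by_cases hq : q c = true <;>
      simp [List.zipIdx_cons, hq, ih (n + 1)]

-- zipIdx carries strictly increasing indices
lemma pvZipIdxPairwise : ∀ (classes : List String) (n : Nat),
    (classes.zipIdx n).Pairwise (fun a b => a.2 < b.2) := by
  have hmem : ∀ (l : List String) (n : Nat) (x : String × Nat), x ∈ l.zipIdx n → n ≤ x.2 := by
    intro l
    induction l with
    | nil => intro n x hx; simp at hx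
    | cons c t ih =>
      intro n x hx
      rcases (by simpa [List.zipIdx_cons] using hx : x = (c, n) ∨ x ∈ t.zipIdx (n + 1)) with h | h
      · simp [h]
      · exact le_trans (by omega) (ih (n + 1) x h)
  intro classes
  induction classes with
  | nil => intro n; simp
  | cons c t ih =>
    intro n
    rw [List.zipIdx_cons]
    exact List.pairwise_cons.2 ⟨fun x hx => lt_of_lt_of_le (by omega) (hmem t (n + 1) x hx), ih (n + 1)⟩

-- proof-side recursion equivalent to the _dedup_values loop (seen set generalized)
def pvDdk : List (String × Nat × String) → PySem.Set String → List (String × Nat × String)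
  | [], _ => []
  | e :: t, s =>
    if PySem.Set.contains s e.2.2 then pvDdk t s
    else e :: pvDdk t (PySem.Set.add s e.2.2)

-- the same recursion on the value strings alone
def pvDdl : List String → PySem.Set String → List String
  | [], _ => []
  | v :: t, s =>
    if PySem.Set.contains s v then pvDdl t s
    else v :: pvDdl t (PySem.Set.add s v)

lemma pvDdk_cons_mem {e : String × Nat × String} {t : List (String × Nat × String)}
    {s : PySem.Set String} (h : e.2.2 ∈ s) : pvDdk (e :: t) s = pvDdk t s := by
  simp [pvDdk, h]

lemma pvDdk_cons_not_mem {e : String × Nat × String} {t : List (String × Nat × String)}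
    {s : PySem.Set String} (h : e.2.2 ∉ s) :
    pvDdk (e :: t) s = e :: pvDdk t (PySem.Set.add s e.2.2) := by
  simp [pvDdk, h]

lemma pvDdl_cons_mem {v : String} {t : List String} {s : PySem.Set String} (h : v ∈ s) :
    pvDdl (v :: t) s = pvDdl t s := by
  simp [pvDdl, h]

lemma pvDdl_cons_not_mem {v : String} {t : List String} {s : PySem.Set String} (h : v ∉ s) :
    pvDdl (v :: t) s = v :: pvDdl t (PySem.Set.add s v) := by
  simp [pvDdl, h]

lemma pvDedupValues_eq_ddk (entries : List (String × Nat × String)) :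
    pvDedupValues entries = pvDdk entries PySem.Set.empty := by
  have h : ∀ (l : List (String × Nat × String)) (s : PySem.Set String)
      (o : List (String × Nat × String)),
      (l.foldl (fun acc e =>
        if PySem.Set.contains acc.1 e.2.2 then acc
        else (PySem.Set.add acc.1 e.2.2, acc.2 ++ [e])) (s, o)).2 = o ++ pvDdk l s := by
    intro l
    induction l with
    | nil => intro s o; simp [pvDdk]
    | cons e t ih =>
      intro s o
      by_cases hc : e.2.2 ∈ s
      · rw [pvDdk_cons_mem hc, List.foldl_cons]
        have : (if PySem.Set.contains s e.2.2 then (s, o)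
            else (PySem.Set.add s e.2.2, o ++ [e])) = (s, o) := by
          simp [hc]
        rw [this, ih]
      · rw [pvDdk_cons_not_mem hc, List.foldl_cons]
        have : (if PySem.Set.contains s e.2.2 then (s, o)
            else (PySem.Set.add s e.2.2, o ++ [e])) = (PySem.Set.add s e.2.2, o ++ [e]) := by
          simp [hc]
        rw [this, ih]
        simp
  unfold pvDedupValues
  simpa using h entries PySem.Set.empty []

lemma pvDdk_sublist : ∀ (l : List (String × Nat × String)) (s : PySem.Set String),
    (pvDdk l s).Sublist l := by
  intro l
  induction l with
  | nil => intro s; simp [pvDdk]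
  | cons e t ih =>
    intro s
    by_cases hc : e.2.2 ∈ s
    · rw [pvDdk_cons_mem hc]
      exact (ih s).trans (List.sublist_cons_self e t)
    · rw [pvDdk_cons_not_mem hc]
      exact (ih (PySem.Set.add s e.2.2)).cons₂ e

-- the seen set only matters through membership of the values occurring in the list
lemma pvDdk_congr : ∀ (l : List (String × Nat × String)) (s s' : PySem.Set String),
    (∀ x ∈ l, x.2.2 ∈ s ↔ x.2.2 ∈ s') → pvDdk l s = pvDdk l s' := by
  intro l
  induction l with
  | nil => intro s s' _; rfl
  | cons e t ih =>
    intro s s' h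
    have he := h e (by simp)
    by_cases hc : e.2.2 ∈ s
    · rw [pvDdk_cons_mem hc, pvDdk_cons_mem (he.1 hc)]
      exact ih s s' (fun x hx => h x (by simp [hx]))
    · have hc' : e.2.2 ∉ s' := fun hm => hc (he.2 hm)
      rw [pvDdk_cons_not_mem hc, pvDdk_cons_not_mem hc']
      refine congrArg _ (ih _ _ ?_)
      intro x hx
      rw [PySem.Set.mem_add, PySem.Set.mem_add]
      have := h x (by simp [hx])
      tauto

-- filtering on a predicate of the value commutes with the value dedup
lemma pvDdk_filter (Q : String → Bool) : ∀ (l : List (String × Nat × String))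
    (s : PySem.Set String),
    (pvDdk l s).filter (fun e => Q e.2.2) = pvDdk (l.filter (fun e => Q e.2.2)) s := by
  intro l
  induction l with
  | nil => intro s; rfl
  | cons e t ih =>
    intro s
    by_cases hq : Q e.2.2 = true
    · have hfil : List.filter (fun x => Q x.2.2) (e :: t)
          = e :: List.filter (fun x => Q x.2.2) t := List.filter_cons_of_pos hq
      by_cases hc : e.2.2 ∈ s
      · rw [pvDdk_cons_mem hc, hfil, pvDdk_cons_mem hc, ih]
      · rw [pvDdk_cons_not_mem hc, hfil, pvDdk_cons_not_mem hc]
        have h2 : List.filter (fun x => Q x.2.2) (e :: pvDdk t (PySem.Set.add s e.2.2))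
            = e :: List.filter (fun x => Q x.2.2) (pvDdk t (PySem.Set.add s e.2.2)) :=
          List.filter_cons_of_pos hq
        rw [h2, ih]
    · have hfil : List.filter (fun x => Q x.2.2) (e :: t)
          = List.filter (fun x => Q x.2.2) t := List.filter_cons_of_neg hq
      by_cases hc : e.2.2 ∈ s
      · rw [pvDdk_cons_mem hc, hfil, ih]
      · rw [pvDdk_cons_not_mem hc, hfil]
        have h2 : List.filter (fun x => Q x.2.2) (e :: pvDdk t (PySem.Set.add s e.2.2))
            = List.filter (fun x => Q x.2.2) (pvDdk t (PySem.Set.add s e.2.2)) :=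
          List.filter_cons_of_neg hq
        rw [h2, ih]
        refine pvDdk_congr _ _ _ ?_
        intro x hx
        have hqx : Q x.2.2 = true := by
          have := (List.mem_filter.1 hx).2; simpa using this
        have hne : x.2.2 ≠ e.2.2 := fun hh => by rw [hh] at hqx; exact hq hqx
        rw [PySem.Set.mem_add]
        tauto

lemma pvDdk_map_val : ∀ (l : List (String × Nat × String)) (s : PySem.Set String),
    (pvDdk l s).map (fun e => e.2.2) = pvDdl (l.map (fun e => e.2.2)) s := by
  intro l
  induction l with
  | nil => intro s; rfl
  | cons e t ih =>
    intro s
    by_cases hc : e.2.2 ∈ s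
    · rw [pvDdk_cons_mem hc, List.map_cons, pvDdl_cons_mem hc, ih]
    · rw [pvDdk_cons_not_mem hc, List.map_cons, List.map_cons, pvDdl_cons_not_mem hc, ih]

lemma pvUpdate_eq_append_ddl : ∀ (l : List String) (s : PySem.Set String),
    PySem.Set.update s l = s ++ pvDdl l s := by
  intro l
  induction l with
  | nil => intro s; simp [pvDdl, PySem.Set.update_nil]
  | cons v t ih =>
    intro s
    rw [PySem.Set.update_cons]
    by_cases hm : v ∈ s
    · rw [pvDdl_cons_mem hm, PySem.Set.add_of_mem hm, ih]
    · rw [pvDdl_cons_not_mem hm, ih (PySem.Set.add s v), PySem.Set.add_of_not_mem hm]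
      simp

lemma pvOfList_eq_ddl (l : List String) : PySem.Set.ofList l = pvDdl l PySem.Set.empty := by
  rw [← PySem.Set.update_nil_left]
  simpa [PySem.Set.empty] using pvUpdate_eq_append_ddl l PySem.Set.empty

-- prepending already-collected elements: updating by a deduped block = updating by the block
lemma pvUpdate_ofList (s : PySem.Set String) (xs : List String) :
    PySem.Set.update s (PySem.Set.ofList xs) = PySem.Set.update s xs := by
  induction xs using List.reverseRecOn with
  | nil => simp
  | append_singleton t x ih =>
    rw [PySem.Set.ofList_append_singleton, PySem.Set.update_append]
    by_cases hm : x ∈ PySem.Set.ofList t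
    · rw [PySem.Set.add_of_mem hm, ih]
      have hx : x ∈ PySem.Set.update s t :=
        (PySem.Set.mem_update _ _ _).2 (Or.inr ((PySem.Set.mem_ofList _ _).1 hm))
      simp [PySem.Set.update_cons, PySem.Set.update_nil, PySem.Set.add_of_mem hx]
    · rw [PySem.Set.add_of_not_mem hm, PySem.Set.update_append, ih]

-- one category of B equals the set of the corresponding per-prefix expression of A
lemma pvCategory (classes : List String) (cond : String → Bool) (k v fkey : String → String)
    (p : String) (hk : ∀ c, k c = fkey (v c)) :
    pvCollect (PySem.List.sorted (pvDedupValues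
        ((classes.zipIdx.filter (fun ci => cond ci.1)).map (fun ci => (k ci.1, ci.2, v ci.1))))
        (fun e => e.1)) p
      = PySem.Set.ofList
          (((classes.filter cond).filter (fun c => PySem.Str.startswith (k c) p)).map v) := by
  set ents := (classes.zipIdx.filter (fun ci => cond ci.1)).map
    (fun ci => (k ci.1, ci.2, v ci.1)) with hents
  have hseq : ents.Pairwise (fun a b => a.2.1 < b.2.1) := by
    rw [hents, List.pairwise_map]
    exact ((pvZipIdxPairwise classes 0).filter _)
  rw [pvDedupValues_eq_ddk]
  have hsub := pvDdk_sublist ents PySem.Set.empty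
  rw [pvCollect_sorted_eq _ p (hseq.sublist hsub)]
  -- the startswith test reads only the value of an entry
  have hcongr : (pvDdk ents PySem.Set.empty).filter (fun e => PySem.Str.startswith e.1 p)
      = (pvDdk ents PySem.Set.empty).filter (fun e => PySem.Str.startswith (fkey e.2.2) p) := by
    refine List.filter_congr ?_
    intro e he
    have hee : e ∈ ents := hsub.mem he
    rw [hents] at hee
    obtain ⟨ci, _, rfl⟩ := List.mem_map.1 hee
    simp [hk ci.1]
  rw [hcongr, pvDdk_filter (fun u => PySem.Str.startswith (fkey u) p), pvDdk_map_val, ← pvOfList_eq_ddl]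
  congr 1
  rw [hents, List.filter_map]
  simp only [List.map_map, Function.comp, List.filter_filter]
  have hc : ((fun e : String × Nat × String => e.2.2) ∘ fun ci : String × Nat =>
      (k ci.1, ci.2, v ci.1)) = fun ci : String × Nat => v ci.1 := rfl
  rw [hc]
  have := pvZipIdxProj v
    (fun c => PySem.Str.startswith (fkey (v c)) p && cond c) classes 0
  rw [this]
  congr 1
  refine List.filter_congr ?_
  intro c _
  rw [hk c]

-- replacing every per-prefix block by its dedup does not change the final set
lemma pvOfList_flat_blocks (a1 a2 a3 : String → List String) :
    ∀ (l : List String) (s : PySem.Set String),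
      PySem.Set.update s (l.flatMap (fun p => PySem.Set.ofList (a1 p)
          ++ (PySem.Set.ofList (a2 p) ++ PySem.Set.ofList (a3 p))))
        = PySem.Set.update s (l.flatMap (fun p => a1 p ++ (a2 p ++ a3 p))) := by
  intro l
  induction l with
  | nil => intro s; rfl
  | cons p t ih =>
    intro s
    simp only [List.flatMap_cons, PySem.Set.update_append]
    rw [pvUpdate_ofList, pvUpdate_ofList, pvUpdate_ofList, ih]

-- ===== VERDICT (by name: the statement is the Claim_ definition above) =====
theorem match_classes_spec : Claim_equal_match_classes := by
  intro classes prefixes _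
  unfold Spec_match_classes
  simp only [match_classes, match_classes_alt]
  rw [PySem.List.dedup_eq_ofList]
  -- name A's three per-prefix blocks
  set a1 : String → List String := fun p =>
    (classes.filter (fun c => !(PySem.Str.isIn ":" c))).filter
      (fun c => PySem.Str.startswith c p) with ha1
  set a2 : String → List String := fun p =>
    (classes.filter (fun c => PySem.Str.isIn ":" c)).filter
      (fun c => PySem.Str.startswith (pyMediaKey c) p) with ha2
  set a3 : String → List String := fun p =>
    ((classes.filter (fun c => PySem.Str.isIn "{" c && PySem.Str.isIn "}" c)).map
      (fun c => pyBindKey c)).filter (fun c => PySem.Str.startswith c p) with ha3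
  -- B's three blocks are the deduped A blocks
  have hpure : ∀ p : String,
      pvCollect (PySem.List.sorted (pvDedupValues
        ((classes.zipIdx.filter (fun ci => !(PySem.Str.isIn ":" ci.1))).map
          (fun ci => (ci.1, ci.2, ci.1)))) (fun e => e.1)) p
      = PySem.Set.ofList (a1 p) := by
    intro p
    have := pvCategory classes (fun c => !(PySem.Str.isIn ":" c)) (fun c => c) (fun c => c)
      (fun c => c) p (fun _ => rfl)
    rw [ha1]; simpa using this
  have hmedia : ∀ p : String,
      pvCollect (PySem.List.sorted (pvDedupValues
        ((classes.zipIdx.filter (fun ci => PySem.Str.isIn ":" ci.1)).map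
          (fun ci => (pyMediaKey ci.1, ci.2, ci.1)))) (fun e => e.1)) p
      = PySem.Set.ofList (a2 p) := by
    intro p
    have := pvCategory classes (fun c => PySem.Str.isIn ":" c) pyMediaKey (fun c => c)
      pyMediaKey p (fun _ => rfl)
    rw [ha2]; simpa using this
  have hbind : ∀ p : String,
      pvCollect (PySem.List.sorted (pvDedupValues
        ((classes.zipIdx.filter (fun ci => PySem.Str.isIn "{" ci.1 && PySem.Str.isIn "}" ci.1)).map
          (fun ci => (pyBindKey ci.1, ci.2, pyBindKey ci.1)))) (fun e => e.1)) p
      = PySem.Set.ofList (a3 p) := by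
    intro p
    have := pvCategory classes (fun c => PySem.Str.isIn "{" c && PySem.Str.isIn "}" c)
      pyBindKey pyBindKey (fun c => c) p (fun _ => rfl)
    rw [ha3]
    simpa [List.filter_map, Function.comp] using this
  -- both loops are flatMaps of their per-prefix blocks
  have hA : prefixes.foldl (fun m p => m ++ a1 p ++ a2 p ++ a3 p) []
      = prefixes.flatMap (fun p => a1 p ++ (a2 p ++ a3 p)) := by
    rw [show (fun m p => m ++ a1 p ++ a2 p ++ a3 p)
        = (fun m p => m ++ (a1 p ++ (a2 p ++ a3 p))) from
      funext fun m => funext fun p => by simp [List.append_assoc]]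
    simpa using PySem.List.foldl_append_eq_flatMap
      (g := fun p => a1 p ++ (a2 p ++ a3 p)) (l := prefixes) (acc := [])
  have hB : prefixes.foldl (fun m p => m ++ PySem.Set.ofList (a1 p)
        ++ PySem.Set.ofList (a2 p) ++ PySem.Set.ofList (a3 p)) []
      = prefixes.flatMap (fun p => PySem.Set.ofList (a1 p)
        ++ (PySem.Set.ofList (a2 p) ++ PySem.Set.ofList (a3 p))) := by
    rw [show (fun m p => m ++ PySem.Set.ofList (a1 p)
          ++ PySem.Set.ofList (a2 p) ++ PySem.Set.ofList (a3 p))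
        = (fun m p => m ++ (PySem.Set.ofList (a1 p)
          ++ (PySem.Set.ofList (a2 p) ++ PySem.Set.ofList (a3 p)))) from
      funext fun m => funext fun p => by simp [List.append_assoc]]
    simpa using PySem.List.foldl_append_eq_flatMap
      (g := fun p => PySem.Set.ofList (a1 p)
        ++ (PySem.Set.ofList (a2 p) ++ PySem.Set.ofList (a3 p))) (l := prefixes) (acc := [])
  calc PySem.Set.ofList (prefixes.foldl (fun m p => m ++ a1 p ++ a2 p ++ a3 p) [])
      = PySem.Set.ofList (prefixes.flatMap (fun p => a1 p ++ (a2 p ++ a3 p))) := by rw [hA]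
    _ = PySem.Set.ofList (prefixes.flatMap (fun p => PySem.Set.ofList (a1 p)
          ++ (PySem.Set.ofList (a2 p) ++ PySem.Set.ofList (a3 p)))) := by
        rw [← PySem.Set.update_nil_left, ← PySem.Set.update_nil_left,
          pvOfList_flat_blocks]
    _ = PySem.Set.ofList (prefixes.foldl (fun m p => m ++ PySem.Set.ofList (a1 p)
          ++ PySem.Set.ofList (a2 p) ++ PySem.Set.ofList (a3 p)) []) := by rw [hB]
    _ = PySem.Set.ofList (prefixes.foldl (fun m p => m
          ++ pvCollect (PySem.List.sorted (pvDedupValues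
            ((classes.zipIdx.filter (fun ci => !(PySem.Str.isIn ":" ci.1))).map
              (fun ci => (ci.1, ci.2, ci.1)))) (fun e => e.1)) p
          ++ pvCollect (PySem.List.sorted (pvDedupValues
            ((classes.zipIdx.filter (fun ci => PySem.Str.isIn ":" ci.1)).map
              (fun ci => (pyMediaKey ci.1, ci.2, ci.1)))) (fun e => e.1)) p
          ++ pvCollect (PySem.List.sorted (pvDedupValues
            ((classes.zipIdx.filter (fun ci => PySem.Str.isIn "{" ci.1
                && PySem.Str.isIn "}" ci.1)).map
              (fun ci => (pyBindKey ci.1, ci.2, pyBindKey ci.1)))) (fun e => e.1)) p) []) := by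
        congr 1
        refine PySem.List.foldl_congr_mem _ _ _ _ ?_
        intro acc x _
        rw [hpure x, hmedia x, hbind x]
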